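-- pv_equiv track=rewrite | github.com/3breiten/Farosint | gui/app.py | extract_owasp_category
-- ===== SOURCE A (Python) =====
-- def extract_owasp_category(url):
--     """Extraer categoría OWASP de URL"""
--     if not url:
--         return ''
--     # https://owasp.org/Top10/A03_2021-Injection/ → A03:2021
--     parts = url.rstrip('/').split('/')
--     for part in parts:
--         if part.startswith('A') and '_' in part:
--             # A03_2021-Injection → A03:2021
--             code = part.split('_')[0]
--             year = part.split('_')[1].split('-')[0]
--             return f"{code}:{year}"
--     return ''
-- ===== SOURCE B (Python) =====
-- def extract_owasp_category(url):
--     """Single left-to-right character scan: at each segment start, if the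
--     segment begins with 'A' and contains '_' before the next '/', cut out
--     code (up to the first '_') and year (up to the next '_', '-' or '/')."""
--     n = len(url)
--     i = 0
--     while i < n:
--         c = url[i]
--         if c == '/':
--             i += 1
--         elif c == 'A':
--             j = i + 1
--             while j < n and url[j] != '_' and url[j] != '/':
--                 j += 1
--             if j < n and url[j] == '_':
--                 k = j + 1
--                 while k < n and url[k] != '_' and url[k] != '-' and url[k] != '/':
--                     k += 1
--                 return url[i:j] + ':' + url[j + 1:k]
--             i = j
--         else:
--             while i < n and url[i] != '/':
--                 i += 1
--     return ''
-- ===== Notes on version B (the rewrite author's own statement) =====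
-- stated objective: alternative
-- what changed: Replaces the rstrip/split pipeline that materialises the list of path segments (and re-splits the matching segment twice) with a single left-to-right index scan that locates the first qualifying segment and slices the code and year substrings out of the url directly.
import Mathlib
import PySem

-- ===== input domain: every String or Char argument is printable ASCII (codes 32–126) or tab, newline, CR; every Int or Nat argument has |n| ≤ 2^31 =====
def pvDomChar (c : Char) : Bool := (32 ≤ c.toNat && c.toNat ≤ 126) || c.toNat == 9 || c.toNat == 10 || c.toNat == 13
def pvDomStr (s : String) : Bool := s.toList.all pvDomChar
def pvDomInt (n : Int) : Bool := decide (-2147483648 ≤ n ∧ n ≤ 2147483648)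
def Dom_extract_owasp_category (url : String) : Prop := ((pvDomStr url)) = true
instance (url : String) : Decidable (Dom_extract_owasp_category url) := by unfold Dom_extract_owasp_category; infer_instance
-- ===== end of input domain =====

-- B replaces the rstrip/split pipeline with one left-to-right character scan (objective: alternative, same cost).

-- ===== PORT A =====
-- the 'for part in parts' loop of A
def eocLoop : List (List Char) → String
  | [] => ""
  | p :: ps =>
    if PySem.Chars.startswith p ['A'] && PySem.Chars.isIn ['_'] p then
      let code := (PySem.Chars.splitOn p ['_']).getD 0 []
      let year := (PySem.Chars.splitOn ((PySem.Chars.splitOn p ['_']).getD 1 []) ['-']).getD 0 []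
      String.mk (code ++ ':' :: year)
    else eocLoop ps

def extract_owasp_category (url : String) : String :=
  if url = "" then ""
  else
    -- url.rstrip('/') ported by hand (exact: drop the trailing '/' characters), then .split('/')
    eocLoop (PySem.Chars.splitOn ((url.toList.reverse.dropWhile (· == '/')).reverse) ['/'])

-- ===== PORT B =====
-- Source B's single scan: at each segment start, an 'A'-segment containing '_' yields code:year
def scanB : List Char → String
  | [] => ""
  | c :: rest =>
    if c == '/' then scanB rest
    else if c == 'A' then
      let pre := rest.takeWhile (fun x => x != '_' && x != '/')
      match h : rest.dropWhile (fun x => x != '_' && x != '/') with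
      | '_' :: tail =>
          String.mk (('A' :: pre) ++ ':' :: tail.takeWhile (fun x => x != '_' && x != '-' && x != '/'))
      | post => scanB post
    else scanB (rest.dropWhile (fun x => x != '/'))
termination_by l => l.length
decreasing_by
  · simp
  · have := List.length_dropWhile_le (fun x => x != '_' && x != '/') rest
    rw [h] at this; simp at this ⊢; omega
  · have := List.length_dropWhile_le (fun x => x != '/') rest
    simp; omega

def extract_owasp_category_alt (url : String) : String := scanB url.toList

-- ===== PRECONDITION & SPEC =====
def Spec_extract_owasp_category (url : String) (out : String) : Prop := out = extract_owasp_category_alt url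
instance (url : String) (out : String) : Decidable (Spec_extract_owasp_category url out) := by unfold Spec_extract_owasp_category; infer_instance

-- ===== CLAIM (what is proved, stated in full; the proofs are below) =====
def Claim_equal_extract_owasp_category : Prop := ∀ (url : String), Dom_extract_owasp_category url → Spec_extract_owasp_category url (extract_owasp_category url)

-- ===== LEMMAS AND PROOFS =====

-- reference version of s.split(c) for a one-character separator
def mySplitC (sep : Char) : List Char → List (List Char)
  | [] => [[]]
  | c :: rest =>
    if c = sep then [] :: mySplitC sep rest
    else match mySplitC sep rest with
      | [] => [[c]]
      | h :: t => (c :: h) :: t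

theorem mySplitC_ne_nil (sep : Char) (l : List Char) : mySplitC sep l ≠ [] := by
  cases l with
  | nil => simp [mySplitC]
  | cons c rest =>
    simp only [mySplitC]
    split
    · simp
    · split <;> simp

-- full characterization of mySplitC by takeWhile/dropWhile
theorem mySplitC_eq (sep : Char) (l : List Char) :
    mySplitC sep l = l.takeWhile (fun x => x != sep) ::
      (match l.dropWhile (fun x => x != sep) with
        | [] => []
        | _ :: r => mySplitC sep r) := by
  induction l with
  | nil => simp [mySplitC]
  | cons c rest ih =>
    by_cases hc : c = sep
    · subst hc; simp [mySplitC, List.takeWhile, List.dropWhile]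
    · have hb : (c != sep) = true := by simp [hc]
      simp only [mySplitC, if_neg hc, List.takeWhile_cons, List.dropWhile_cons, hb, if_true, ih]


theorem mySplitC_cons_sep (sep : Char) (r : List Char) :
    mySplitC sep (sep :: r) = [] :: mySplitC sep r := by
  simp [mySplitC]

theorem mySplitC_decomp {sep : Char} {l r : List Char}
    (h : l.dropWhile (fun x => x != sep) = sep :: r) :
    mySplitC sep l = l.takeWhile (fun x => x != sep) :: mySplitC sep r := by
  rw [mySplitC_eq, h]

theorem mySplitC_decomp_nil {sep : Char} {l : List Char}
    (h : l.dropWhile (fun x => x != sep) = []) :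
    mySplitC sep l = [l.takeWhile (fun x => x != sep)] := by
  rw [mySplitC_eq, h]

theorem mySplitC_getD0 (sep : Char) (l : List Char) :
    (mySplitC sep l).getD 0 [] = l.takeWhile (fun x => x != sep) := by
  rw [mySplitC_eq]
  rfl

theorem mySplitC_getD1 {sep : Char} {l r : List Char}
    (h : l.dropWhile (fun x => x != sep) = sep :: r) :
    (mySplitC sep l).getD 1 [] = r.takeWhile (fun x => x != sep) := by
  rw [mySplitC_decomp h, List.getD_cons_succ, mySplitC_getD0]

def consHead (pre : List Char) : List (List Char) → List (List Char)
  | [] => [pre]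
  | h :: t => (pre ++ h) :: t

theorem splitOn_go_eq (s : Char) (fuel : Nat) (l cur : List Char) (acc : List (List Char))
    (hf : l.length ≤ fuel) :
    PySem.Chars.splitOn.go [s] fuel l cur acc = acc.reverse ++ consHead cur.reverse (mySplitC s l) := by
  induction fuel generalizing l cur acc with
  | zero =>
    have : l = [] := by cases l <;> simp_all
    subst this
    simp [PySem.Chars.splitOn.go, mySplitC, consHead]
  | succ fuel ih =>
    cases l with
    | nil => simp [PySem.Chars.splitOn.go, mySplitC, consHead]
    | cons c rest =>
      rw [PySem.Chars.splitOn.go]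
      by_cases hc : c = s
      · rw [if_pos (by simp [List.isPrefixOf, hc])]
        rw [ih _ _ _ (by simp at hf ⊢; omega)]
        have hne := mySplitC_ne_nil s rest
        cases hm : mySplitC s rest with
        | nil => exact absurd hm hne
        | cons a t => simp [mySplitC, consHead, hm, hc]
      · rw [if_neg (by simp [List.isPrefixOf]; exact fun h => absurd h.symm hc)]
        rw [ih _ _ _ (by simp at hf ⊢; omega)]
        have hne := mySplitC_ne_nil s rest
        cases hm : mySplitC s rest with
        | nil => exact absurd hm hne
        | cons a t => simp [mySplitC, consHead, hm, if_neg hc]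

theorem splitOn_single (s : Char) (l : List Char) :
    PySem.Chars.splitOn l [s] = mySplitC s l := by
  have h := splitOn_go_eq s (l.length + 1) l [] [] (by omega)
  rw [PySem.Chars.splitOn, h]
  cases hm : mySplitC s l with
  | nil => exact absurd hm (mySplitC_ne_nil s l)
  | cons a t => simp [consHead]

theorem scanB_nil : scanB [] = "" := by rw [scanB]
theorem scanB_slash (rest : List Char) : scanB ('/' :: rest) = scanB rest := by
  rw [scanB]; simp
theorem scanB_other {c : Char} (rest : List Char) (h1 : c ≠ '/') (h2 : c ≠ 'A') :
    scanB (c :: rest) = scanB (rest.dropWhile (fun x => x != '/')) := by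
  rw [scanB]; simp [h1, h2]
theorem scanB_A_hit {rest tail : List Char}
    (h : rest.dropWhile (fun x => x != '_' && x != '/') = '_' :: tail) :
    scanB ('A' :: rest) = String.mk (('A' :: rest.takeWhile (fun x => x != '_' && x != '/')) ++
      ':' :: tail.takeWhile (fun x => x != '_' && x != '-' && x != '/')) := by
  rw [scanB, if_neg (by decide), if_pos (by decide)]
  split
  · next tail' heq => rw [h] at heq; cases heq; rfl
  · next hne' => exact (hne' _ h).elim
theorem scanB_A_miss {rest post : List Char}
    (h : rest.dropWhile (fun x => x != '_' && x != '/') = post)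
    (hne : ∀ tail, post ≠ '_' :: tail) :
    scanB ('A' :: rest) = scanB post := by
  rw [scanB, if_neg (by decide), if_pos (by decide)]
  split
  · next tail' heq => exact absurd (h.symm.trans heq) (hne _)
  · next _ => rw [h]

theorem takeWhile_append_of_all {p : Char → Bool} {a : List Char} (b : List Char)
    (h : ∀ x ∈ a, p x = true) : (a ++ b).takeWhile p = a ++ b.takeWhile p := by
  induction a with
  | nil => simp
  | cons x a ih =>
    simp only [List.cons_append, List.takeWhile_cons, h x (by simp)]
    simp only [if_true]
    rw [ih (fun y hy => h y (by simp [hy]))]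

theorem dropWhile_append_of_all {p : Char → Bool} {a : List Char} (b : List Char)
    (h : ∀ x ∈ a, p x = true) : (a ++ b).dropWhile p = b.dropWhile p := by
  induction a with
  | nil => simp
  | cons x a ih =>
    simp only [List.cons_append, List.dropWhile_cons, h x (by simp)]
    exact ih (fun y hy => h y (by simp [hy]))

theorem takeWhile_append_of_nil {p : Char → Bool} {b : List Char} (a : List Char)
    (h : b.takeWhile p = []) : (a ++ b).takeWhile p = a.takeWhile p := by
  induction a with
  | nil => simp [h]
  | cons x a ih =>
    simp only [List.cons_append, List.takeWhile_cons]
    cases hx : p x <;> simp [ih]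

theorem dropWhile_append_ne_nil {p : Char → Bool} {a : List Char} (b : List Char)
    (h : a.dropWhile p ≠ []) : (a ++ b).dropWhile p = a.dropWhile p ++ b := by
  induction a with
  | nil => simp at h
  | cons x a ih =>
    simp only [List.cons_append, List.dropWhile_cons] at h ⊢
    cases hx : p x
    · simp [hx]
    · rw [hx] at h; simp only [if_true] at h ⊢
      exact ih h

theorem dropWhile_head_false {p : Char → Bool} {l : List Char} {x : Char} {xs : List Char}
    (h : l.dropWhile p = x :: xs) : p x = false := by
  induction l with
  | nil => simp at h
  | cons c rest ih =>
    rw [List.dropWhile_cons] at h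
    split at h
    · exact ih h
    · cases h; simp_all

theorem scanB_all_slash (sl : List Char) (h : ∀ x ∈ sl, x = '/') : scanB sl = "" := by
  induction sl with
  | nil => exact scanB_nil
  | cons c rest ih =>
    have hc : c = '/' := h c (by simp)
    subst hc
    rw [scanB_slash]
    exact ih (fun y hy => h y (by simp [hy]))

theorem takeWhile_slashes {p : Char → Bool} (sl : List Char) (hsl : ∀ x ∈ sl, x = '/')
    (hp : p '/' = false) : sl.takeWhile p = [] := by
  cases sl with
  | nil => rfl
  | cons c rest =>
    have : c = '/' := hsl c (by simp)
    subst this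
    simp [List.takeWhile_cons, hp]

theorem dropWhile_slashes {p : Char → Bool} (sl : List Char) (hsl : ∀ x ∈ sl, x = '/')
    (hp : p '/' = false) : sl.dropWhile p = sl := by
  cases sl with
  | nil => rfl
  | cons c rest =>
    have : c = '/' := hsl c (by simp)
    subst this
    simp [List.dropWhile_cons, hp]

theorem scanB_append_slashes (cs sl : List Char) (h : ∀ x ∈ sl, x = '/') :
    scanB (cs ++ sl) = scanB cs := by
  induction cs using scanB.induct with
  | case1 => rw [scanB_nil, List.nil_append]; exact scanB_all_slash sl h
  | case2 c rest hc ih =>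
    have hc' : c = '/' := by simpa using hc
    subst hc'
    rw [List.cons_append, scanB_slash, scanB_slash]; exact ih
  | case3 c rest hc hA tail hdw =>
    have hA' : c = 'A' := by simpa using hA
    subst hA'
    rw [List.cons_append, scanB_A_hit hdw,
        scanB_A_hit (tail := tail ++ sl)
          (by rw [dropWhile_append_ne_nil sl (by rw [hdw]; simp), hdw]; rfl)]
    rw [takeWhile_append_of_nil rest (takeWhile_slashes sl h (by decide)),
        takeWhile_append_of_nil tail (takeWhile_slashes sl h (by decide))]
  | case4 c rest hc hA hne ih =>
    have hA' : c = 'A' := by simpa using hA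
    subst hA'
    have hmiss : ∀ tl, rest.dropWhile (fun x => x != '_' && x != '/') ≠ '_' :: tl :=
      fun tl hh => hne tl hh
    rw [List.cons_append, scanB_A_miss rfl hmiss]
    cases hdw : rest.dropWhile (fun x => x != '_' && x != '/') with
    | nil =>
      rw [scanB_A_miss (post := sl)
            (by rw [dropWhile_append_of_all sl (by
                  intro x hx
                  have := List.dropWhile_eq_nil_iff.mp hdw x hx  -- check name
                  exact this)]
                exact dropWhile_slashes sl h (by decide))
            (by intro tl htl; subst htl; exact absurd (h '_' (by simp)) (by decide))]
      rw [scanB_nil]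
      exact scanB_all_slash sl h
    | cons x xs =>
      have hx : x ≠ '_' := by
        intro hh; subst hh; exact hmiss xs hdw
      rw [scanB_A_miss (post := (x :: xs) ++ sl)
            (by rw [dropWhile_append_ne_nil sl (by rw [hdw]; simp), hdw])
            (by intro tl htl; rw [List.cons_append] at htl; cases htl; exact hx rfl)]
      rw [hdw] at ih
      exact ih
  | case5 c rest hc hA ih =>
    rw [List.cons_append,
        scanB_other _ (by simpa using hc) (by simpa using hA),
        scanB_other _ (by simpa using hc) (by simpa using hA)]
    cases hdw : rest.dropWhile (fun x => x != '/') with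
    | nil =>
      rw [dropWhile_append_of_all sl (fun x hx => by
            have := List.dropWhile_eq_nil_iff.mp hdw x hx
            exact this)]
      rw [dropWhile_slashes sl h (by decide), scanB_nil]
      exact scanB_all_slash sl h
    | cons x xs =>
      rw [dropWhile_append_ne_nil sl (by rw [hdw]; simp), hdw]
      rw [hdw] at ih
      exact ih

-- evaluation of A's loop condition
theorem startswith_single_cons (c : Char) (l : List Char) :
    PySem.Chars.startswith (c :: l) ['A'] = (c == 'A') := by
  simp [PySem.Chars.startswith, List.isPrefixOf]
  exact eq_comm

theorem isIn_single (x : Char) (l : List Char) :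
    PySem.Chars.isIn [x] l = decide (x ∈ l) := by
  by_cases hm : x ∈ l
  · simp [hm, (PySem.Chars.isIn_iff_infix [x] l).mpr ((List.singleton_infix_iff x l).mpr hm)]
  · simp only [hm, decide_false]
    rw [PySem.Chars.isIn_eq_false_iff]
    intro hinf
    exact hm ((List.singleton_infix_iff x l).mp hinf)

theorem eocLoop_skip (p : List Char) (ps : List (List Char))
    (hcond : (PySem.Chars.startswith p ['A'] && PySem.Chars.isIn ['_'] p) = false) :
    eocLoop (p :: ps) = eocLoop ps := by
  rw [eocLoop, if_neg (by simp [hcond])]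

theorem eocLoop_nil_head (ps : List (List Char)) : eocLoop ([] :: ps) = eocLoop ps := by
  apply eocLoop_skip
  simp [PySem.Chars.startswith, List.isPrefixOf]

theorem tw3 (t : List Char) :
    ((t.takeWhile (fun x => x != '/')).takeWhile (fun x => x != '_')).takeWhile (fun x => x != '-')
      = t.takeWhile (fun x => x != '_' && x != '-' && x != '/') := by
  induction t with
  | nil => simp
  | cons c t ih =>
    by_cases h1 : c = '/'
    · subst h1; simp [List.takeWhile_cons]
    · by_cases h2 : c = '_'
      · subst h2; simp [List.takeWhile_cons]
      · by_cases h3 : c = '-'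
        · subst h3; simp [List.takeWhile_cons]
        · simp only [List.takeWhile_cons, bne_iff_ne, ne_eq, h1, h2, h3,
            not_false_eq_true, decide_true, Bool.and_self, if_true, ih]
          simp [h1, h2, h3]

-- main bridge: A's loop over the split segments = B's scan
theorem eocLoop_mySplit (cs : List Char) : eocLoop (mySplitC '/' cs) = scanB cs := by
  induction cs using scanB.induct with
  | case1 =>
    rw [scanB_nil, show mySplitC '/' [] = [[]] from rfl, eocLoop_nil_head]
    rfl
  | case2 c rest hc ih =>
    have hc' : c = '/' := by simpa using hc
    subst hc'
    rw [scanB_slash, mySplitC_cons_sep, eocLoop_nil_head]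
    exact ih
  | case3 c rest hc hA tail hdw =>
    have hA' : c = 'A' := by simpa using hA
    subst hA'
    have hrest : rest = rest.takeWhile (fun x => x != '_' && x != '/') ++ '_' :: tail := by
      conv_lhs => rw [← List.takeWhile_append_dropWhile
        (p := fun x => x != '_' && x != '/') (l := rest)]
      rw [hdw]
    have hpre : ∀ x ∈ rest.takeWhile (fun x => x != '_' && x != '/'), x ≠ '_' ∧ x ≠ '/' := by
      intro x hx
      have := List.mem_takeWhile_imp hx
      simp at this
      exact this
    rw [scanB_A_hit hdw, mySplitC_eq]
    have hseg : List.takeWhile (fun x => x != '/') ('A' :: rest)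
        = 'A' :: (rest.takeWhile (fun x => x != '_' && x != '/')
            ++ '_' :: tail.takeWhile (fun x => x != '/')) := by
      rw [List.takeWhile_cons]
      simp only [show (('A' : Char) != '/') = true from rfl, if_true]
      conv_lhs => rw [hrest]
      rw [takeWhile_append_of_all _ (fun x hx => by simp [(hpre x hx).2])]
      rw [List.takeWhile_cons]
      rfl
    rw [hseg, eocLoop]
    rw [if_pos (by
      rw [startswith_single_cons, isIn_single]
      simp)]
    rw [splitOn_single, splitOn_single]
    have hdrop : ('A' :: (rest.takeWhile (fun x => x != '_' && x != '/')
            ++ '_' :: tail.takeWhile (fun x => x != '/'))).dropWhile (fun x => x != '_')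
        = '_' :: tail.takeWhile (fun x => x != '/') := by
      rw [List.dropWhile_cons]
      simp only [show (('A' : Char) != '_') = true from rfl, if_true]
      rw [dropWhile_append_of_all _ (fun x hx => by simp [(hpre x hx).1])]
      rw [List.dropWhile_cons]
      rfl
    rw [mySplitC_getD1 hdrop, mySplitC_getD0, mySplitC_getD0]
    have htake : List.takeWhile (fun x => x != '_')
        ('A' :: (rest.takeWhile (fun x => x != '_' && x != '/')
            ++ '_' :: tail.takeWhile (fun x => x != '/')))
        = 'A' :: rest.takeWhile (fun x => x != '_' && x != '/') := by
      rw [List.takeWhile_cons]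
      simp only [show (('A' : Char) != '_') = true from rfl, if_true]
      rw [takeWhile_append_of_all _ (fun x hx => by simp [(hpre x hx).1])]
      rw [List.takeWhile_cons]
      simp
    rw [htake, tw3]
  | case4 c rest hc hA hne ih =>
    have hA' : c = 'A' := by simpa using hA
    subst hA'
    have hmiss : ∀ tl, rest.dropWhile (fun x => x != '_' && x != '/') ≠ '_' :: tl :=
      fun tl hh => hne tl hh
    rw [scanB_A_miss rfl hmiss]
    cases hdw : rest.dropWhile (fun x => x != '_' && x != '/') with
    | nil =>
      have hall : ∀ x ∈ rest, x ≠ '_' ∧ x ≠ '/' := by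
        intro x hx
        have := List.dropWhile_eq_nil_iff.mp hdw x hx
        simpa using this
      have h2 : ('A' :: rest).dropWhile (fun x => x != '/') = [] := by
        rw [List.dropWhile_cons]
        simp only [show (('A' : Char) != '/') = true from rfl, if_true]
        exact List.dropWhile_eq_nil_iff.mpr (fun x hx => by simp [(hall x hx).2])
      have hseg : ('A' :: rest).takeWhile (fun x => x != '/') = 'A' :: rest := by
        rw [List.takeWhile_cons]
        simp only [show (('A' : Char) != '/') = true from rfl, if_true]
        exact congrArg _ (List.takeWhile_eq_self_iff.mpr (fun x hx => by simp [(hall x hx).2]))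
      rw [mySplitC_decomp_nil h2, hseg]
      rw [eocLoop_skip _ _ (by
        rw [startswith_single_cons, isIn_single]
        simp only [Bool.and_eq_false_iff]
        right
        simp only [decide_eq_false_iff_not, List.mem_cons]
        push_neg
        exact ⟨by decide, fun hmem => (hall _ hmem).1 rfl⟩)]
      rw [scanB_nil]
      rfl
    | cons x xs =>
      have hx : x = '/' := by
        have hxf := dropWhile_head_false hdw
        have hx' : x ≠ '_' := fun hh => hmiss xs (hh ▸ hdw)
        simp [hx'] at hxf
        exact hxf
      subst hx
      have hpre : ∀ y ∈ rest.takeWhile (fun x => x != '_' && x != '/'), y ≠ '_' ∧ y ≠ '/' := by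
        intro y hy
        have := List.mem_takeWhile_imp hy
        simp at this
        exact this
      have hrest : rest = rest.takeWhile (fun x => x != '_' && x != '/') ++ '/' :: xs := by
        conv_lhs => rw [← List.takeWhile_append_dropWhile
          (p := fun x => x != '_' && x != '/') (l := rest)]
        rw [hdw]
      have h2 : ('A' :: rest).dropWhile (fun x => x != '/') = '/' :: xs := by
        rw [List.dropWhile_cons]
        simp only [show (('A' : Char) != '/') = true from rfl, if_true]
        conv_lhs => rw [hrest]
        rw [dropWhile_append_of_all _ (fun y hy => by simp [(hpre y hy).2])]
        rw [List.dropWhile_cons]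
        rfl
      have hseg : ('A' :: rest).takeWhile (fun x => x != '/')
          = 'A' :: rest.takeWhile (fun x => x != '_' && x != '/') := by
        rw [List.takeWhile_cons]
        simp only [show (('A' : Char) != '/') = true from rfl, if_true]
        conv_lhs => rw [hrest]
        rw [takeWhile_append_of_all _ (fun y hy => by simp [(hpre y hy).2]),
          List.takeWhile_cons]
        simp
      rw [mySplitC_decomp h2, hseg]
      rw [eocLoop_skip _ _ (by
        rw [startswith_single_cons, isIn_single]
        simp only [Bool.and_eq_false_iff]
        right
        simp only [decide_eq_false_iff_not, List.mem_cons]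
        push_neg
        exact ⟨by decide, fun hmem => (hpre _ hmem).1 rfl⟩)]
      rw [hdw, mySplitC_cons_sep, eocLoop_nil_head] at ih
      exact ih
  | case5 c rest hc hA ih =>
    have hc' : c ≠ '/' := by simpa using hc
    have hA' : c ≠ 'A' := by simpa using hA
    rw [scanB_other _ hc' hA']
    have hcond : ∀ tl, (PySem.Chars.startswith (c :: tl) ['A']
        && PySem.Chars.isIn ['_'] (c :: tl)) = false := by
      intro tl
      rw [startswith_single_cons]
      simp [hA']
    cases hdw : rest.dropWhile (fun x => x != '/') with
    | nil =>
      have h2 : (c :: rest).dropWhile (fun x => x != '/') = [] := by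
        rw [List.dropWhile_cons]
        simp only [bne_iff_ne, ne_eq, hc', not_false_eq_true, decide_true, if_true]
        exact hdw
      rw [mySplitC_decomp_nil h2]
      rw [show (c :: rest).takeWhile (fun x => x != '/')
            = c :: rest.takeWhile (fun x => x != '/') by
          rw [List.takeWhile_cons]
          simp [hc']]
      rw [eocLoop_skip _ _ (hcond _), scanB_nil]
      rfl
    | cons x xs =>
      have hx : x = '/' := by
        have hxf := dropWhile_head_false hdw
        simpa using hxf
      subst hx
      have h2 : (c :: rest).dropWhile (fun x => x != '/') = '/' :: xs := by
        rw [List.dropWhile_cons]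
        simp only [bne_iff_ne, ne_eq, hc', not_false_eq_true, decide_true, if_true]
        exact hdw
      rw [mySplitC_decomp h2]
      rw [show (c :: rest).takeWhile (fun x => x != '/')
            = c :: rest.takeWhile (fun x => x != '/') by
          rw [List.takeWhile_cons]
          simp [hc']]
      rw [eocLoop_skip _ _ (hcond _)]
      rw [hdw, mySplitC_cons_sep, eocLoop_nil_head] at ih
      exact ih

-- ===== VERDICT (by name: the statement is the Claim_ definition above) =====
theorem extract_owasp_category_spec : Claim_equal_extract_owasp_category := by
  intro url _
  unfold Spec_extract_owasp_category extract_owasp_category extract_owasp_category_alt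
  split
  · next h => subst h; simp [scanB]
  · rw [splitOn_single, eocLoop_mySplit]
    have hdecomp : url.toList = (url.toList.reverse.dropWhile (· == '/')).reverse ++
        (url.toList.reverse.takeWhile (· == '/')).reverse := by
      rw [← List.reverse_append,
        List.takeWhile_append_dropWhile (p := (· == '/')) (l := url.toList.reverse),
        List.reverse_reverse]
    conv_rhs => rw [hdecomp]
    rw [scanB_append_slashes]
    intro x hx
    have := List.mem_takeWhile_imp (List.mem_reverse.mp hx)
    simpa using this
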